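-- pv_equiv track=rewrite | github.com/GizawAAiT/Codeforces | C_Frog_Jumps.py | min_jump_bruteforce
-- ===== SOURCE A (Python) =====
-- from collections import deque
--
-- def min_jump_bruteforce(s: str) -> int:
--     n = len(s)
--     for d in range(1, n + 2):                     # n+1 is certainly enough
--         vis = [False]*(n+2)
--         q = deque([0])
--         vis[0] = True
--         while q:
--             i = q.popleft()
--             if i == n + 1:
--                 return d
--             if i == 0 or s[i-1] == 'R':           # move right
--                 for nxt in range(i+1, min(n+2, i+d+1)):
--                     if not vis[nxt]:
--                         vis[nxt] = True
--                         q.append(nxt)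
--             if i and s[i-1] == 'L':               # move left
--                 for nxt in range(max(0, i-d), i):
--                     if not vis[nxt]:
--                         vis[nxt] = True
--                         q.append(nxt)
--     return n + 1
-- ===== SOURCE B (Python) =====
-- def min_jump_bruteforce(s: str) -> int:
--     # single pass: answer is the largest gap between consecutive standable
--     # positions (start 0, each 'R' cell, and the far bank len(s)+1)
--     ans = 0
--     prev = 0
--     for i, c in enumerate(s, 1):
--         if c == 'R':
--             if i - prev > ans:
--                 ans = i - prev
--             prev = i
--     last = len(s) + 1 - prev
--     return ans if ans > last else last
-- ===== Notes on version B (the rewrite author's own statement) =====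
-- stated objective: faster
-- what changed: A runs an iterative-deepening BFS (for each candidate jump distance d it BFS-explores the whole board) to find the minimal feasible d; B computes the answer directly in one left-to-right pass as the maximum gap between consecutive standable positions (start 0, each 'R' cell, and the far bank n+1).
import Mathlib
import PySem

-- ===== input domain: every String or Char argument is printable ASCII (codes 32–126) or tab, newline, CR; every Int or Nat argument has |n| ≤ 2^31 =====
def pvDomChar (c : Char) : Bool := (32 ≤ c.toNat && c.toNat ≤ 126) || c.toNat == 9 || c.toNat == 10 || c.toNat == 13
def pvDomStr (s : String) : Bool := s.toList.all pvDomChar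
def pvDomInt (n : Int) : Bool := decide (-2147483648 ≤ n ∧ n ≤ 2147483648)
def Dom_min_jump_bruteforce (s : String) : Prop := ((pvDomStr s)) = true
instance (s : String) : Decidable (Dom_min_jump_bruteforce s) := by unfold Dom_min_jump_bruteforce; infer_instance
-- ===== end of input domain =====

-- B replaces A's iterative-deepening BFS (try each d, re-explore the board) by a single
-- left-to-right pass computing the maximum gap between consecutive standable positions
-- (start 0, the 'R' cells, the far bank n+1); objective: faster (measured).

-- ===== PORT A =====
-- indices are kept as Nat: every index the Python touches is provably nonnegative
-- (queue holds 0..n+1, s[i-1] is read only for 1 ≤ i ≤ n, so always in range);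
-- Python's max(0, i-d) is Nat truncated subtraction i - d.
def pvSeen (vis : List Bool) (j : Nat) : Bool := vis.getD j false

def pvMark (vis : List Bool) (j : Nat) : List Bool := vis.set j true

-- `for nxt in ps: if not vis[nxt]: vis[nxt] = True; q.append(nxt)`
def pvPush (st : List Bool × List Nat) (ps : List Nat) : List Bool × List Nat :=
  ps.foldl (fun st nxt => if pvSeen st.1 nxt then st else (pvMark st.1 nxt, st.2 ++ [nxt])) st

-- body of one BFS loop iteration after popping i (the two `for nxt in range(...)` blocks)
def pvStep (C : List Char) (n d i : Nat) (vis : List Bool) (rest : List Nat) :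
    List Bool × List Nat :=
  let st1 := if i = 0 ∨ C.getD (i-1) ' ' = 'R' then
      pvPush (vis, rest) (List.range' (i+1) (min (n+2) (i+d+1) - (i+1))) else (vis, rest)
  if i ≠ 0 ∧ C.getD (i-1) ' ' = 'L' then
      pvPush st1 (List.range' (i - d) (i - (i - d))) else st1

-- the `while q:` loop; fuel n+2 bounds the iteration count (each iteration pops one
-- element and enqueues only freshly visited cells), proven sufficient in the lemmas
def pvBfs (C : List Char) (n d : Nat) : Nat → List Bool → List Nat → Bool
  | 0, _, _ => false
  | fuel+1, vis, q =>
    match q with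
    | [] => false
    | i :: rest =>
      if i = n + 1 then true
      else pvBfs C n d fuel (pvStep C n d i vis rest).1 (pvStep C n d i vis rest).2

def min_jump_bruteforce (s : String) : Int :=
  let C := s.toList
  let n := C.length
  match (List.range' 1 (n+1)).find?
      (fun d => pvBfs C n d (n+2) ((List.replicate (n+2) false).set 0 true) [0]) with
  | some d => (d : Int)
  | none => (n : Int) + 1

-- ===== PORT B =====
-- `for i, c in enumerate(s, 1): ...` with state (ans, prev)
def pvBalt : List Char → Nat → Nat → Nat → Nat × Nat
  | [], _, ans, prev => (ans, prev)
  | c :: rest, i, ans, prev =>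
    if c = 'R' then pvBalt rest (i+1) (max ans (i - prev)) i
    else pvBalt rest (i+1) ans prev

def min_jump_bruteforce_alt (s : String) : Int :=
  let C := s.toList
  let n := C.length
  let r := pvBalt C 1 0 0
  ((max r.1 (n + 1 - r.2) : Nat) : Int)

-- ===== PRECONDITION & SPEC =====
def Spec_min_jump_bruteforce (s : String) (out : Int) : Prop := out = min_jump_bruteforce_alt s
instance (s : String) (out : Int) : Decidable (Spec_min_jump_bruteforce s out) := by unfold Spec_min_jump_bruteforce; infer_instance

-- ===== CLAIM (what is proved, stated in full; the proofs are below) =====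
def Claim_equal_min_jump_bruteforce : Prop := ∀ (s : String), Dom_min_jump_bruteforce s → Spec_min_jump_bruteforce s (min_jump_bruteforce s)

-- ===== LEMMAS AND PROOFS =====

-- ---------- small facts about vis (List Bool) ----------

lemma pvSeen_mark (vis : List Bool) (j x : Nat) (hj : j < vis.length) :
    pvSeen (pvMark vis j) x = (pvSeen vis x || decide (x = j)) := by
  unfold pvSeen pvMark
  simp only [List.getD, List.getElem?_set]
  by_cases h : j = x
  · subst h; simp [hj]
  · simp [h, Ne.symm h]

lemma pvMark_length (vis : List Bool) (j : Nat) : (pvMark vis j).length = vis.length := by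
  simp [pvMark]

lemma pvCount_mark (vis : List Bool) (j : Nat) (hj : j < vis.length)
    (hf : pvSeen vis j = false) : (pvMark vis j).count false + 1 = vis.count false := by
  induction vis generalizing j with
  | nil => simp at hj
  | cons a l ih =>
    cases j with
    | zero =>
      unfold pvSeen at hf
      simp [List.getD] at hf
      subst hf
      simp [pvMark]
    | succ j =>
      have hj' : j < l.length := by simpa using hj
      have hf' : pvSeen l j = false := by
        unfold pvSeen at hf ⊢
        simpa [List.getD] using hf
      have := ih j hj' hf'
      simp only [pvMark, List.set] at this ⊢
      simp [List.count_cons]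
      omega

lemma pvSeen_replicate (m x : Nat) : pvSeen (List.replicate m false) x = false := by
  unfold pvSeen
  simp [List.getD, List.getElem?_replicate]
  split <;> rfl

-- ---------- spec of pvPush ----------

lemma pvPush_spec (ps : List Nat) (vis : List Bool) (q0 : List Nat)
    (hnd : ps.Nodup) (hlt : ∀ x ∈ ps, x < vis.length) :
    (pvPush (vis, q0) ps).1.length = vis.length ∧
    (∀ x, pvSeen (pvPush (vis, q0) ps).1 x = (pvSeen vis x || decide (x ∈ ps))) ∧
    ∃ news : List Nat, (pvPush (vis, q0) ps).2 = q0 ++ news ∧ news.Nodup ∧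
      (∀ x ∈ news, x ∈ ps ∧ pvSeen vis x = false) ∧
      (∀ x ∈ ps, pvSeen vis x = false → x ∈ news) ∧
      (pvPush (vis, q0) ps).1.count false + news.length = vis.count false := by
  induction ps generalizing vis q0 with
  | nil =>
    exact ⟨rfl, fun x => by simp [pvPush], [], by simp [pvPush], by simp, by simp, by simp,
      by simp [pvPush]⟩
  | cons y ps ih =>
    have hy : y < vis.length := hlt y (by simp)
    have hyps : y ∉ ps := (List.nodup_cons.mp hnd).1
    have hnd' : ps.Nodup := (List.nodup_cons.mp hnd).2
    by_cases hs : pvSeen vis y = true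
    · have hstep : pvPush (vis, q0) (y::ps) = pvPush (vis, q0) ps := by
        simp [pvPush, hs]
      obtain ⟨h1, h2, news, h3, h4, h5, h6, h7⟩ :=
        ih vis q0 hnd' (fun x hx => hlt x (by simp [hx]))
      rw [hstep]
      refine ⟨h1, ?_, news, h3, h4, ?_, ?_, h7⟩
      · intro x
        rw [h2 x]
        by_cases hxy : x = y
        · subst hxy; simp [hs]
        · simp [hxy]
      · exact fun x hx => ⟨by simp [(h5 x hx).1], (h5 x hx).2⟩
      · intro x hx hxf
        rcases List.mem_cons.mp hx with h | h
        · subst h; rw [hs] at hxf; cases hxf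
        · exact h6 x h hxf
    · have hsf : pvSeen vis y = false := by simpa using hs
      have hstep : pvPush (vis, q0) (y::ps) = pvPush (pvMark vis y, q0 ++ [y]) ps := by
        simp [pvPush, hsf]
      obtain ⟨h1, h2, news, h3, h4, h5, h6, h7⟩ :=
        ih (pvMark vis y) (q0 ++ [y]) hnd'
          (fun x hx => by rw [pvMark_length]; exact hlt x (by simp [hx]))
      rw [hstep]
      have hmarky : pvSeen (pvMark vis y) y = true := by
        rw [pvSeen_mark vis y y hy]; simp
      refine ⟨h1.trans (pvMark_length _ _), ?_, y :: news, ?_, ?_, ?_, ?_, ?_⟩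
      · intro x
        rw [h2 x, pvSeen_mark vis y x hy]
        by_cases hxy : x = y
        · subst hxy; simp
        · simp [hxy]
      · rw [h3, List.append_cons, List.append_assoc]
        simp
      · refine List.nodup_cons.mpr ⟨?_, h4⟩
        intro hc
        have := (h5 y hc).2
        rw [hmarky] at this; cases this
      · intro x hx
        rcases List.mem_cons.mp hx with h | h
        · subst h; exact ⟨by simp, hsf⟩
        · refine ⟨by simp [(h5 x h).1], ?_⟩
          have := (h5 x h).2
          rw [pvSeen_mark vis y x hy] at this
          simpa using (Bool.or_eq_false_iff.mp this).1
      · intro x hx hxf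
        rcases List.mem_cons.mp hx with h | h
        · subst h; exact List.mem_cons_self
        · by_cases hxy : x = y
          · subst hxy; exact List.mem_cons_self
          · refine List.mem_cons_of_mem _ (h6 x h ?_)
            rw [pvSeen_mark vis y x hy, hxf]
            simp [hxy]
      · have hcm := pvCount_mark vis y hy hsf
        simp only [List.length_cons]
        omega

-- ---------- reachability relation realised by the BFS ----------

def pvEdge (C : List Char) (n d i j : Nat) : Prop :=
  ((i = 0 ∨ C.getD (i-1) ' ' = 'R') ∧ i+1 ≤ j ∧ j ≤ min (n+1) (i+d)) ∨
  ((i ≠ 0 ∧ C.getD (i-1) ' ' = 'L') ∧ i - d ≤ j ∧ j < i)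

def pvReach (C : List Char) (n d a b : Nat) : Prop :=
  Relation.ReflTransGen (fun i j => pvEdge C n d i j) a b

lemma pvStep_spec (C : List Char) (n d i : Nat) (vis : List Bool) (rest : List Nat)
    (hlen : vis.length = n + 2) (hin : i ≤ n) :
    (pvStep C n d i vis rest).1.length = n + 2 ∧
    (∀ x, (pvStep C n d i vis rest).1.getD x false = true ↔
        (pvSeen vis x = true ∨ pvEdge C n d i x)) ∧
    ∃ news : List Nat, (pvStep C n d i vis rest).2 = rest ++ news ∧ news.Nodup ∧
      (∀ x ∈ news, pvEdge C n d i x ∧ pvSeen vis x = false) ∧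
      (∀ x, pvEdge C n d i x → pvSeen vis x = false → x ∈ news) ∧
      (pvStep C n d i vis rest).1.count false + news.length = vis.count false := by
  have hR1mem : ∀ x, x ∈ List.range' (i+1) (min (n+2) (i+d+1) - (i+1)) ↔
      (i+1 ≤ x ∧ x ≤ min (n+1) (i+d)) := by
    intro x; rw [List.mem_range'_1]; omega
  have hR2mem : ∀ x, x ∈ List.range' (i - d) (i - (i - d)) ↔ (i - d ≤ x ∧ x < i) := by
    intro x; rw [List.mem_range'_1]; omega
  by_cases hcR : i = 0 ∨ C.getD (i-1) ' ' = 'R'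
  · by_cases hcL : i ≠ 0 ∧ C.getD (i-1) ' ' = 'L'
    · exfalso
      rcases hcR with h0 | hr
      · exact hcL.1 h0
      · rw [hr] at hcL; exact absurd hcL.2 (by decide)
    · have hedge : ∀ x, pvEdge C n d i x ↔ (i+1 ≤ x ∧ x ≤ min (n+1) (i+d)) := by
        intro x
        unfold pvEdge
        constructor
        · rintro (⟨_, h⟩ | ⟨hc, _⟩)
          · exact h
          · exact absurd hc hcL
        · intro h; exact Or.inl ⟨hcR, h⟩
      have hst : pvStep C n d i vis rest =
          pvPush (vis, rest) (List.range' (i+1) (min (n+2) (i+d+1) - (i+1))) := by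
        simp only [pvStep]; rw [if_neg hcL, if_pos hcR]
      obtain ⟨h1, h2, news, h3, h4, h5, h6, h7⟩ :=
        pvPush_spec (List.range' (i+1) (min (n+2) (i+d+1) - (i+1))) vis rest
          (List.nodup_range')
          (fun x hx => by rw [hlen]; have := (hR1mem x).mp hx; omega)
      rw [hst]
      refine ⟨h1.trans hlen, ?_, news, h3, h4, ?_, ?_, h7⟩
      · intro x
        have := h2 x
        unfold pvSeen at this
        rw [this]
        simp only [Bool.or_eq_true, decide_eq_true_eq]
        rw [hR1mem x, ← hedge x]
        exact Iff.rfl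
      · intro x hx
        obtain ⟨hm, hf⟩ := h5 x hx
        exact ⟨(hedge x).mpr ((hR1mem x).mp hm), hf⟩
      · intro x he hf
        exact h6 x ((hR1mem x).mpr ((hedge x).mp he)) hf
  · by_cases hcL : i ≠ 0 ∧ C.getD (i-1) ' ' = 'L'
    · have hedge : ∀ x, pvEdge C n d i x ↔ (i - d ≤ x ∧ x < i) := by
        intro x
        unfold pvEdge
        constructor
        · rintro (⟨hc, _⟩ | ⟨_, h⟩)
          · exact absurd hc hcR
          · exact h
        · intro h; exact Or.inr ⟨hcL, h⟩
      have hst : pvStep C n d i vis rest =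
          pvPush (vis, rest) (List.range' (i - d) (i - (i - d))) := by
        simp only [pvStep]; rw [if_pos hcL, if_neg hcR]
      obtain ⟨h1, h2, news, h3, h4, h5, h6, h7⟩ :=
        pvPush_spec (List.range' (i - d) (i - (i - d))) vis rest
          (List.nodup_range')
          (fun x hx => by rw [hlen]; have := (hR2mem x).mp hx; omega)
      rw [hst]
      refine ⟨h1.trans hlen, ?_, news, h3, h4, ?_, ?_, h7⟩
      · intro x
        have := h2 x
        unfold pvSeen at this
        rw [this]
        simp only [Bool.or_eq_true, decide_eq_true_eq]
        rw [hR2mem x, ← hedge x]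
        exact Iff.rfl
      · intro x hx
        obtain ⟨hm, hf⟩ := h5 x hx
        exact ⟨(hedge x).mpr ((hR2mem x).mp hm), hf⟩
      · intro x he hf
        exact h6 x ((hR2mem x).mpr ((hedge x).mp he)) hf
    · have hedge : ∀ x, ¬ pvEdge C n d i x := by
        intro x
        rintro (⟨hc, _⟩ | ⟨hc, _⟩)
        · exact hcR hc
        · exact hcL hc
      have hst : pvStep C n d i vis rest = (vis, rest) := by
        simp only [pvStep]; rw [if_neg hcL, if_neg hcR]
      rw [hst]
      refine ⟨hlen, ?_, [], by simp, by simp, by simp, ?_, by simp⟩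
      · intro x
        show pvSeen vis x = true ↔ _
        simp [hedge x]
      · intro x he
        exact absurd he (hedge x)

lemma pvFrontier (C : List Char) (n d : Nat) (vis : List Bool) (q : List Nat)
    (hcl : ∀ x, pvSeen vis x = true → x ∉ q → x ≠ n+1 ∧
        ∀ j, pvEdge C n d x j → pvSeen vis j = true) :
    ∀ m, pvSeen vis m = true → pvReach C n d m (n+1) →
      ∃ x, x ∈ q ∧ pvReach C n d x (n+1) := by
  intro m hm hr
  induction hr using Relation.ReflTransGen.head_induction_on with
  | refl =>
    by_cases hq : (n+1) ∈ q
    · exact ⟨n+1, hq, Relation.ReflTransGen.refl⟩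
    · exact absurd rfl (hcl _ hm hq).1
  | head h htail ih =>
    rename_i a c
    by_cases hq : a ∈ q
    · exact ⟨a, hq, Relation.ReflTransGen.head h htail⟩
    · exact ih ((hcl a hm hq).2 _ h)

lemma pvBfs_correct (C : List Char) (n d : Nat) :
    ∀ (fuel : Nat) (vis : List Bool) (q : List Nat),
    vis.length = n + 2 →
    q.Nodup →
    (∀ x ∈ q, pvSeen vis x = true) →
    pvSeen vis 0 = true →
    (∀ x, pvSeen vis x = true → x ≤ n+1) →
    (∀ x, pvSeen vis x = true → pvReach C n d 0 x) →
    (∀ x, pvSeen vis x = true → x ∉ q → x ≠ n+1 ∧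
        ∀ j, pvEdge C n d x j → pvSeen vis j = true) →
    vis.count false + q.length ≤ fuel →
    (pvBfs C n d fuel vis q = true ↔ pvReach C n d 0 (n+1)) := by
  intro fuel
  induction fuel with
  | zero =>
    intro vis q hlen hnd hqm h0 hbd hrc hcl hfuel
    have hq : q = [] := by
      cases q with
      | nil => rfl
      | cons a l => simp [List.length_cons] at hfuel
    subst hq
    simp only [pvBfs]
    constructor
    · intro h; cases h
    · intro hr
      obtain ⟨x, hx, -⟩ := pvFrontier C n d vis [] hcl 0 h0 hr
      simp at hx
  | succ fuel ih =>
    intro vis q hlen hnd hqm h0 hbd hrc hcl hfuel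
    cases q with
    | nil =>
      simp only [pvBfs]
      constructor
      · intro h; cases h
      · intro hr
        obtain ⟨x, hx, -⟩ := pvFrontier C n d vis [] hcl 0 h0 hr
        simp at hx
    | cons i rest =>
      by_cases hi : i = n+1
      · subst hi
        simp only [pvBfs]
        constructor
        · intro _; exact hrc _ (hqm (n+1) (by simp))
        · intro _; rfl
      · have him : pvSeen vis i = true := hqm i (by simp)
        have hile : i ≤ n := by
          have := hbd i him
          omega
        obtain ⟨e1, e2, news, e3, e4, e5, e6, e7⟩ := pvStep_spec C n d i vis rest hlen hile
        have hbfs : pvBfs C n d (fuel+1) vis (i::rest) =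
            pvBfs C n d fuel (pvStep C n d i vis rest).1 (pvStep C n d i vis rest).2 := by
          simp only [pvBfs, if_neg hi]
        rw [hbfs, e3]
        have hseen' : ∀ x, pvSeen (pvStep C n d i vis rest).1 x = true ↔
            (pvSeen vis x = true ∨ pvEdge C n d i x) := e2
        have hrestnd : rest.Nodup := (List.nodup_cons.mp hnd).2
        refine ih (pvStep C n d i vis rest).1 (rest ++ news) e1 ?_ ?_ ?_ ?_ ?_ ?_ ?_
        · refine hrestnd.append e4 ?_
          intro x hx1 hx2
          have h1 := hqm x (List.mem_cons_of_mem _ hx1)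
          have h2 := (e5 x hx2).2
          rw [h1] at h2; cases h2
        · intro x hx
          rcases List.mem_append.mp hx with h | h
          · exact (hseen' x).mpr (Or.inl (hqm x (List.mem_cons_of_mem _ h)))
          · exact (hseen' x).mpr (Or.inr (e5 x h).1)
        · exact (hseen' 0).mpr (Or.inl h0)
        · intro x hx
          rcases (hseen' x).mp hx with h | h
          · exact hbd x h
          · rcases h with ⟨-, -, hub⟩ | ⟨-, -, hlt⟩ <;> omega
        · intro x hx
          rcases (hseen' x).mp hx with h | h
          · exact hrc x h
          · exact Relation.ReflTransGen.tail (hrc i him) h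
        · intro x hx hnq
          by_cases hxi : x = i
          · subst hxi
            exact ⟨hi, fun j hj => (hseen' j).mpr (Or.inr hj)⟩
          · by_cases hxs : pvSeen vis x = true
            · have hxq : x ∉ i :: rest := by
                intro hc
                rcases List.mem_cons.mp hc with h | h
                · exact hxi h
                · exact hnq (List.mem_append.mpr (Or.inl h))
              obtain ⟨hne, htg⟩ := hcl x hxs hxq
              exact ⟨hne, fun j hj => (hseen' j).mpr (Or.inl (htg j hj))⟩
            · exfalso
              rcases (hseen' x).mp hx with h | h
              · exact hxs h
              · exact hnq (List.mem_append.mpr (Or.inr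
                  (e6 x h (by simpa using hxs))))
        · simp only [List.length_cons] at hfuel
          simp only [List.length_append]
          omega

-- ---------- graph side: reachability ↔ no all-non-'R' window of length d ----------

lemma pvBarrier (C : List Char) (n d j : Nat) (hw : j + d ≤ n)
    (hnR : ∀ i, j ≤ i → i < j + d → C.getD i ' ' ≠ 'R') :
    ∀ x, pvReach C n d 0 x → x ≤ j + d := by
  intro x hr
  induction hr with
  | refl => omega
  | tail h e ih =>
    rename_i b c
    rcases e with ⟨hcond, h1, h2⟩ | ⟨-, -, hlt⟩
    · rcases hcond with h0 | hRchar
      · omega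
      · have hbj : b ≤ j := by
          by_contra hc
          exact hnR (b-1) (by omega) (by omega) hRchar
        omega
    · omega

lemma pvComplete (C : List Char) (n d : Nat)
    (hR : ∀ j, j + d ≤ n → ∃ i, j ≤ i ∧ i < j + d ∧ C.getD i ' ' = 'R') :
    ∀ (m p : Nat), n + 1 - p ≤ m → p ≤ n → (p = 0 ∨ C.getD (p-1) ' ' = 'R') →
      pvReach C n d p (n+1) := by
  intro m
  induction m with
  | zero => intro p h1 h2 _; omega
  | succ m ih =>
    intro p h1 h2 hstand
    by_cases hnd1 : n + 1 ≤ p + d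
    · exact Relation.ReflTransGen.single (Or.inl ⟨hstand, by omega, by omega⟩)
    · obtain ⟨i, hpi, hilt, hiR⟩ := hR p (by omega)
      refine Relation.ReflTransGen.head (Or.inl ⟨hstand, by omega, by omega⟩)
        (ih (i+1) (by omega) (by omega) (Or.inr ?_))
      simpa using hiR

-- ---------- the gap quantity B computes ----------

def pvGapAux : List Char → Nat → Nat
  | [], k => k + 1
  | c :: rest, k => if c = 'R' then max (k+1) (pvGapAux rest 0) else pvGapAux rest (k+1)

lemma pvGapAux_ge : ∀ (rest : List Char) (k : Nat), k + 1 ≤ pvGapAux rest k := by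
  intro rest
  induction rest with
  | nil => intro k; simp [pvGapAux]
  | cons c rest ih =>
    intro k
    by_cases h : c = 'R' <;> simp [pvGapAux, h]
    · have := ih (k+1); omega

lemma pvGapAux_le : ∀ (rest : List Char) (k : Nat), pvGapAux rest k ≤ k + rest.length + 1 := by
  intro rest
  induction rest with
  | nil => intro k; simp [pvGapAux]
  | cons c rest ih =>
    intro k
    by_cases h : c = 'R' <;> simp [pvGapAux, h]
    · have := ih 0; omega
    · have := ih (k+1); omega

def pvWin (d : Nat) (M : List Char) : Prop :=
  ∃ j, j + d ≤ M.length ∧ ∀ i, j ≤ i → i < j + d → M.getD i ' ' ≠ 'R'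

lemma pvWin_congr (d : Nat) (M M' : List Char) (hl : M.length = M'.length)
    (h : ∀ i, i < M.length → ((M.getD i ' ' = 'R') ↔ (M'.getD i ' ' = 'R'))) :
    pvWin d M ↔ pvWin d M' := by
  unfold pvWin
  constructor
  · rintro ⟨j, hj, hne⟩
    exact ⟨j, hl ▸ hj, fun i h1 h2 => fun hc => hne i h1 h2 ((h i (by omega)).2 hc)⟩
  · rintro ⟨j, hj, hne⟩
    exact ⟨j, hl ▸ hj, fun i h1 h2 => fun hc => hne i h1 h2 ((h i (by omega)).1 hc)⟩

lemma pvGetD_rep (k i : Nat) (l : List Char) :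
    (List.replicate k ' ' ++ l).getD i ' ' = if i < k then ' ' else l.getD (i - k) ' ' := by
  rcases lt_or_ge i k with h | h
  · rw [if_pos h, List.getD_append _ _ _ _ (by simp [h])]
    simp [List.getD, List.getElem?_replicate]
    split <;> rfl
  · rw [if_neg (not_lt.mpr h), List.getD_append_right _ _ _ _ (by simp [h])]
    simp

lemma pvGap_char : ∀ (rest : List Char) (k d : Nat),
    pvGapAux rest k ≤ d ↔ ¬ pvWin d (List.replicate k ' ' ++ rest) := by
  intro rest
  induction rest with
  | nil =>
    intro k d
    have hwin : pvWin d (List.replicate k ' ' ++ ([] : List Char)) ↔ d ≤ k := by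
      constructor
      · rintro ⟨j, hj, -⟩
        simp at hj
        omega
      · intro h
        refine ⟨0, by simp; omega, fun i h1 h2 => ?_⟩
        rw [pvGetD_rep, if_pos (by omega)]
        decide
    rw [hwin]
    show pvGapAux [] k ≤ d ↔ ¬ d ≤ k
    simp only [pvGapAux]
    omega
  | cons c rest ih =>
    intro k d
    by_cases hc : c = 'R'
    · subst hc
      have hdec : pvWin d (List.replicate k ' ' ++ 'R' :: rest) ↔ (d ≤ k ∨ pvWin d rest) := by
        constructor
        · rintro ⟨j, hj, hne⟩
          by_cases hjk : j + d ≤ k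
          · left; omega
          · right
            have hjk1 : k + 1 ≤ j := by
              by_contra hc'
              refine hne k (by omega) (by omega) ?_
              rw [pvGetD_rep, if_neg (by omega)]
              simp
            refine ⟨j - (k+1), ?_, ?_⟩
            · simp at hj ⊢
              omega
            · intro i h1 h2
              have h3 := hne (k + (i + 1)) (by omega) (by omega)
              rw [pvGetD_rep, if_neg (by omega)] at h3
              simpa using h3
        · rintro (h | ⟨j, hj, hne⟩)
          · refine ⟨0, by simp; omega, fun i h1 h2 => ?_⟩
            rw [pvGetD_rep, if_pos (by omega)]
            decide
          · refine ⟨j + (k+1), by simp at hj ⊢; omega, fun i h1 h2 => ?_⟩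
            rw [pvGetD_rep, if_neg (by omega)]
            have hrw : i - k = (i - (k+1)) + 1 := by omega
            rw [hrw]
            simpa using hne (i - (k+1)) (by omega) (by omega)
      rw [hdec]
      have hgap : pvGapAux ('R'::rest) k = max (k+1) (pvGapAux rest 0) := by
        simp [pvGapAux]
      rw [hgap, max_le_iff]
      have h0 := ih 0 d
      simp only [List.replicate_zero, List.nil_append] at h0
      rw [h0, not_or]
      exact and_congr (by omega) Iff.rfl
    · have hcong : pvWin d (List.replicate k ' ' ++ c :: rest) ↔
          pvWin d (List.replicate (k+1) ' ' ++ rest) := by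
        refine pvWin_congr d _ _ (by simp; omega) ?_
        intro i hi
        rw [pvGetD_rep, pvGetD_rep]
        rcases Nat.lt_trichotomy i k with h | h | h
        · rw [if_pos h, if_pos (by omega)]
        · subst h
          rw [if_neg (by omega), if_pos (by omega)]
          simp [hc]
        · rw [if_neg (by omega), if_neg (by omega)]
          have hrw : i - k = (i - (k+1)) + 1 := by omega
          rw [hrw]
          simp
      rw [hcong]
      simp only [pvGapAux, if_neg hc]
      exact ih (k+1) d

-- ---------- B's fold computes pvGapAux ----------

lemma pvBalt_spec : ∀ (rest : List Char) (prev k i ans : Nat), i = prev + k + 1 →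
    max (pvBalt rest i ans prev).1 ((i + rest.length) - (pvBalt rest i ans prev).2)
      = max ans (pvGapAux rest k) := by
  intro rest
  induction rest with
  | nil =>
    intro prev k i ans hi
    simp only [pvBalt, pvGapAux, List.length_nil]
    rw [show i + 0 - prev = k + 1 from by omega]
  | cons c rest ih =>
    intro prev k i ans hi
    by_cases hc : c = 'R'
    · subst hc
      have hb : pvBalt ('R'::rest) i ans prev = pvBalt rest (i+1) (max ans (i - prev)) i := by
        simp [pvBalt]
      have hgap : pvGapAux ('R'::rest) k = max (k+1) (pvGapAux rest 0) := by
        simp [pvGapAux]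
      rw [hb, hgap, show i - prev = k + 1 from by omega,
        show i + ('R'::rest).length = (i+1) + rest.length from by simp; omega,
        ih i 0 (i+1) (max ans (k+1)) (by omega), ← max_assoc]
    · have hb : pvBalt (c::rest) i ans prev = pvBalt rest (i+1) ans prev := by
        simp [pvBalt, hc]
      have hgap : pvGapAux (c::rest) k = pvGapAux rest (k+1) := by
        simp [pvGapAux, hc]
      rw [hb, hgap, show i + (c::rest).length = (i+1) + rest.length from by simp; omega,
        ih prev (k+1) (i+1) ans (by omega)]

lemma pvAlt_eq_gap (s : String) :
    min_jump_bruteforce_alt s = ((pvGapAux s.toList 0 : Nat) : Int) := by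
  show ((max (pvBalt s.toList 1 0 0).1 (s.toList.length + 1 - (pvBalt s.toList 1 0 0).2) : Nat) : Int) = _
  have h := pvBalt_spec s.toList 0 0 1 0 rfl
  rw [Nat.add_comm 1 s.toList.length] at h
  rw [h]
  simp

-- ---------- find? over range' of a monotone predicate ----------

lemma pvFind_mono (p : Nat → Bool) (g : Nat) : ∀ (len a : Nat), a ≤ g → g < a + len →
    (∀ x, a ≤ x → x < a + len → (p x = true ↔ g ≤ x)) →
    (List.range' a len).find? p = some g := by
  intro len
  induction len with
  | zero => intro a h1 h2; omega
  | succ len ih =>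
    intro a h1 h2 hp
    rw [List.range'_succ]
    by_cases hga : g ≤ a
    · have : g = a := le_antisymm hga h1
      subst this
      have hg : p g = true := (hp g h1 (by omega)).2 le_rfl
      rw [List.find?_cons_of_pos (h := hg)]
    · have hpa : p a = false := by
        have := hp a le_rfl (by omega)
        rw [Bool.eq_false_iff]
        intro hc
        exact hga (this.1 hc)
      rw [List.find?_cons_of_neg (h := by simp [hpa])]
      exact ih (a+1) (by omega) (by omega) (fun x hx1 hx2 => hp x (by omega) (by omega))

-- ---------- assembly ----------

lemma pvBfs_iff_gap (C : List Char) (n d : Nat) (hn : n = C.length) :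
    (pvBfs C n d (n+2) ((List.replicate (n+2) false).set 0 true) [0] = true ↔
      pvGapAux C 0 ≤ d) := by
  have hseen0 : ∀ x, pvSeen ((List.replicate (n+2) false).set 0 true) x = decide (x = 0) := by
    intro x
    show pvSeen (pvMark (List.replicate (n+2) false) 0) x = _
    rw [pvSeen_mark _ _ _ (by simp), pvSeen_replicate]
    simp
  have hcnt : ((List.replicate (n+2) false).set 0 true).count false + 1 = n + 2 := by
    have := pvCount_mark (List.replicate (n+2) false) 0 (by simp) (pvSeen_replicate _ _)
    simpa using this
  have hbfs := pvBfs_correct C n d (n+2) ((List.replicate (n+2) false).set 0 true) [0]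
    (by simp) (by simp) (by intro x hx; simp at hx; subst hx; rw [hseen0]; simp)
    (by rw [hseen0]; simp)
    (by intro x hx; rw [hseen0] at hx; simp at hx; omega)
    (by intro x hx; rw [hseen0] at hx; simp at hx; subst hx; exact Relation.ReflTransGen.refl)
    (by intro x hx hnq; rw [hseen0] at hx; simp at hx; subst hx; simp at hnq)
    (by simp only [List.length_cons, List.length_nil]; omega)
  rw [hbfs]
  have hwin : pvGapAux C 0 ≤ d ↔ ¬ pvWin d C := by
    have := pvGap_char C 0 d
    simpa using this
  rw [hwin]
  constructor
  · intro hreach hwinc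
    obtain ⟨j, hj, hne⟩ := hwinc
    have := pvBarrier C n d j (by omega) hne (n+1) hreach
    omega
  · intro hnowin
    have hR : ∀ j, j + d ≤ n → ∃ i, j ≤ i ∧ i < j + d ∧ C.getD i ' ' = 'R' := by
      intro j hj
      by_contra hcon
      push Not at hcon
      exact hnowin ⟨j, by omega, fun i h1 h2 => hcon i h1 h2⟩
    exact pvComplete C n d hR (n+1) 0 (by omega) (by omega) (Or.inl rfl)


-- ===== VERDICT (by name: the statement is the Claim_ definition above) =====
theorem min_jump_bruteforce_spec : Claim_equal_min_jump_bruteforce := by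
  intro s _
  unfold Spec_min_jump_bruteforce
  rw [pvAlt_eq_gap]
  show (match (List.range' 1 (s.toList.length+1)).find?
      (fun d => pvBfs s.toList s.toList.length d (s.toList.length+2)
        ((List.replicate (s.toList.length+2) false).set 0 true) [0]) with
    | some d => (d : Int)
    | none => (s.toList.length : Int) + 1) = _
  have hg1 : 1 ≤ pvGapAux s.toList 0 := pvGapAux_ge s.toList 0
  have hg2 : pvGapAux s.toList 0 ≤ s.toList.length + 1 := by
    have := pvGapAux_le s.toList 0
    omega
  rw [pvFind_mono _ (pvGapAux s.toList 0) (s.toList.length+1) 1 hg1 (by omega)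
    (fun x _ _ => pvBfs_iff_gap s.toList s.toList.length x rfl)]
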